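-- pv_equiv track=rewrite | github.com/zhao-rui123/xuezi-tools-backup | services/memory-backup-20260311/context_recovery.py | _get_primary_match_type
-- ===== SOURCE A (Python) =====
-- from typing import Dict, List, Optional, Tuple, Any, Set
--
-- def _get_primary_match_type(match_types: List[str]) -> str:
--     """确定主要匹配类型"""
--     if not match_types:
--         return "unknown"
--
--     # 优先级顺序
--     priority = ["exact", "scene", "synonym", "fuzzy", "partial"]
--     for p in priority:
--         if p in match_types:
--             return p
--     return match_types[0]
-- ===== SOURCE B (Python) =====
-- def _get_primary_match_type(match_types):
--     """Rank-table version: one pass over match_types keeping the best-ranked element."""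
--     if not match_types:
--         return "unknown"
--     priority = ["exact", "scene", "synonym", "fuzzy", "partial"]
--     rank = {p: i for i, p in enumerate(priority)}
--     best = match_types[0]
--     for t in match_types[1:]:
--         if rank.get(t, len(priority)) < rank.get(best, len(priority)):
--             best = t
--     return best
-- ===== Notes on version B (the rewrite author's own statement) =====
-- stated objective: alternative
-- what changed: A scans match_types once per priority level (early-return loop over the priority list); B builds a rank table once and makes a single pass over match_types keeping the first element of smallest rank, the all-unranked case naturally yielding match_types[0].
import Mathlib
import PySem

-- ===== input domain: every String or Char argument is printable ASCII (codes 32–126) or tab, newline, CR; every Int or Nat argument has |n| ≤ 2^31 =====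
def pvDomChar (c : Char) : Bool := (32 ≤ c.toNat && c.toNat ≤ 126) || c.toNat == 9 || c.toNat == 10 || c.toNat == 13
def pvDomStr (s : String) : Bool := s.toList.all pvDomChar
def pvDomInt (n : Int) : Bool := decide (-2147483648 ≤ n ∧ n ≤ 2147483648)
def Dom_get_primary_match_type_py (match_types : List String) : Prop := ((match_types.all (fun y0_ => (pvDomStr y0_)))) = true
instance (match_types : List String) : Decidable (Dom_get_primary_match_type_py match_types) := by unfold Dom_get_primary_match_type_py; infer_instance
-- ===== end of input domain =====

-- ===== PORT A =====
-- B rebuilds the priority order as a rank table and takes a single min-scan over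
-- match_types instead of A's per-priority membership scans; return values agree everywhere.

-- for p in priority: if p in match_types: return p   (early-return loop = find?)
def get_primary_match_type_py (match_types : List String) : String :=
  if match_types = [] then "unknown"
  else
    let priority : List String := ["exact", "scene", "synonym", "fuzzy", "partial"]
    match priority.find? (fun p => match_types.contains p) with
    | some p => p
    | none => (PySem.List.pyGet? match_types 0).getD "unknown"  -- match_types[0]; list nonempty here

-- ===== PORT B =====
-- rank = {p: i for i, p in enumerate(priority)}
def pvRank : PySem.Dict String Int :=
  (PySem.List.enumerate (["exact", "scene", "synonym", "fuzzy", "partial"] : List String)).foldl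
    (fun d ip => d.insert ip.2 ip.1) PySem.Dict.empty

-- rank.get(t, len(priority))
def pvKey (t : String) : Int := pvRank.getD t 5

def get_primary_match_type_py_alt (match_types : List String) : String :=
  match match_types with
  | [] => "unknown"
  | b :: rest =>
    rest.foldl (fun best t => if pvKey t < pvKey best then t else best) b

-- ===== PRECONDITION & SPEC =====
def Spec_get_primary_match_type_py (match_types : List String) (out : String) : Prop := out = get_primary_match_type_py_alt match_types
instance (match_types : List String) (out : String) : Decidable (Spec_get_primary_match_type_py match_types out) := by unfold Spec_get_primary_match_type_py; infer_instance

-- ===== CLAIM (what is proved, stated in full; the proofs are below) =====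
def Claim_equal_get_primary_match_type_py : Prop := ∀ (match_types : List String), Dom_get_primary_match_type_py match_types → Spec_get_primary_match_type_py match_types (get_primary_match_type_py match_types)

-- ===== LEMMAS AND PROOFS =====

theorem pvKey_eq (t : String) :
    pvKey t = if t = "exact" then 0 else if t = "scene" then 1 else if t = "synonym" then 2
              else if t = "fuzzy" then 3 else if t = "partial" then 4 else 5 := by
  simp [pvKey, pvRank, PySem.List.enumerate_cons, PySem.List.enumerate_nil, List.foldl,
        PySem.Dict.getD_insert]
  split_ifs <;> simp_all

theorem pvKey_nonneg (t : String) : 0 ≤ pvKey t := by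
  rw [pvKey_eq]; split_ifs <;> norm_num

theorem pvKey_val0 (t : String) (h : pvKey t = 0) : t = "exact" := by
  rw [pvKey_eq] at h; split_ifs at h <;> first | assumption | omega

theorem pvKey_val1 (t : String) (h : pvKey t = 1) : t = "scene" := by
  rw [pvKey_eq] at h; split_ifs at h <;> first | assumption | omega

theorem pvKey_val2 (t : String) (h : pvKey t = 2) : t = "synonym" := by
  rw [pvKey_eq] at h; split_ifs at h <;> first | assumption | omega

theorem pvKey_val3 (t : String) (h : pvKey t = 3) : t = "fuzzy" := by
  rw [pvKey_eq] at h; split_ifs at h <;> first | assumption | omega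

theorem pvKey_val4 (t : String) (h : pvKey t = 4) : t = "partial" := by
  rw [pvKey_eq] at h; split_ifs at h <;> first | assumption | omega

theorem pvKey_five (t : String) (h0 : t ≠ "exact") (h1 : t ≠ "scene") (h2 : t ≠ "synonym")
    (h3 : t ≠ "fuzzy") (h4 : t ≠ "partial") : pvKey t = 5 := by
  rw [pvKey_eq]; simp [h0, h1, h2, h3, h4]

-- the fold computes an element of b :: rest whose key is minimal
theorem foldl_min_mem_le (rest : List String) (b : String) :
    (rest.foldl (fun best t => if pvKey t < pvKey best then t else best) b) ∈ b :: rest ∧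
    ∀ y ∈ b :: rest,
      pvKey (rest.foldl (fun best t => if pvKey t < pvKey best then t else best) b) ≤ pvKey y := by
  induction rest generalizing b with
  | nil => simp
  | cons t rest ih =>
    simp only [List.foldl_cons]
    by_cases h : pvKey t < pvKey b
    · simp only [if_pos h]
      obtain ⟨hm, hle⟩ := ih t
      refine ⟨List.mem_cons_of_mem _ hm, ?_⟩
      intro y hy
      rcases List.mem_cons.mp hy with hyb | hy'
      · exact hyb ▸ le_trans (hle t List.mem_cons_self) (le_of_lt h)
      · exact hle y hy'
    · simp only [if_neg h]
      obtain ⟨hm, hle⟩ := ih b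
      refine ⟨?_, ?_⟩
      · rcases List.mem_cons.mp hm with hmb | hm'
        · rw [hmb]; exact List.mem_cons_self
        · exact List.mem_cons_of_mem _ (List.mem_cons_of_mem _ hm')
      · intro y hy
        rcases List.mem_cons.mp hy with hyb | hy'
        · exact hle y (hyb ▸ List.mem_cons_self)
        · rcases List.mem_cons.mp hy' with hyt | hy''
          · exact hyt ▸ le_trans (hle b List.mem_cons_self) (le_of_not_gt h)
          · exact hle y (List.mem_cons_of_mem _ hy'')

-- if nothing in rest beats b, the fold keeps b
theorem foldl_keep (rest : List String) (b : String)
    (h : ∀ t ∈ rest, ¬ pvKey t < pvKey b) :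
    rest.foldl (fun best t => if pvKey t < pvKey best then t else best) b = b := by
  induction rest with
  | nil => rfl
  | cons t rest ih =>
    simp only [List.foldl_cons, if_neg (h t List.mem_cons_self)]
    exact ih (fun t' ht' => h t' (List.mem_cons_of_mem _ ht'))

-- ===== VERDICT (by name: the statement is the Claim_ definition above) =====
theorem get_primary_match_type_py_spec : Claim_equal_get_primary_match_type_py := by
  intro xs _
  unfold Spec_get_primary_match_type_py
  match xs with
  | [] => rfl
  | b :: rest =>
    simp only [get_primary_match_type_py, get_primary_match_type_py_alt]
    rw [if_neg (by simp)]
    obtain ⟨hmem, hmin⟩ := foldl_min_mem_le rest b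
    set r := rest.foldl (fun best t => if pvKey t < pvKey best then t else best) b with hr
    by_cases h0 : "exact" ∈ b :: rest
    · have hfind : (["exact", "scene", "synonym", "fuzzy", "partial"] : List String).find?
          (fun p => (b :: rest).contains p) = some "exact" := by
            have cp : ((b :: rest).contains "exact") = true := by simpa using h0
            simp only [List.find?_cons, cp]
      rw [hfind]
      have hk : pvKey r = 0 :=
        le_antisymm (by simpa using hmin _ h0) (pvKey_nonneg r)
      exact ((pvKey_val0 r hk).symm : "exact" = r)
    · by_cases h1 : "scene" ∈ b :: rest
      · have hfind : (["exact", "scene", "synonym", "fuzzy", "partial"] : List String).find?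
            (fun p => (b :: rest).contains p) = some "scene" := by
              have c0 : ((b :: rest).contains "exact") = false := by simpa using h0
              have cp : ((b :: rest).contains "scene") = true := by simpa using h1
              simp only [List.find?_cons, c0, cp]
        rw [hfind]
        have hub : pvKey r ≤ 1 := by simpa using hmin _ h1
        have hlb : 1 ≤ pvKey r := by
          rcases lt_or_ge (pvKey r) 1 with hl | hg
          · exact absurd (pvKey_val0 r (le_antisymm (by omega) (pvKey_nonneg r)) ▸ hmem) h0
          · exact hg
        exact ((pvKey_val1 r (le_antisymm hub hlb)).symm : "scene" = r)
      · by_cases h2 : "synonym" ∈ b :: rest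
        · have hfind : (["exact", "scene", "synonym", "fuzzy", "partial"] : List String).find?
              (fun p => (b :: rest).contains p) = some "synonym" := by
                have c0 : ((b :: rest).contains "exact") = false := by simpa using h0
                have c1 : ((b :: rest).contains "scene") = false := by simpa using h1
                have cp : ((b :: rest).contains "synonym") = true := by simpa using h2
                simp only [List.find?_cons, c0, c1, cp]
          rw [hfind]
          have hub : pvKey r ≤ 2 := by simpa using hmin _ h2
          have hlb : 2 ≤ pvKey r := by
            rcases lt_or_ge (pvKey r) 2 with hl | hg
            · rcases lt_or_ge (pvKey r) 1 with hl' | hg'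
              · exact absurd (pvKey_val0 r (le_antisymm (by omega) (pvKey_nonneg r)) ▸ hmem) h0
              · exact absurd (pvKey_val1 r (by omega) ▸ hmem) h1
            · exact hg
          exact ((pvKey_val2 r (le_antisymm hub hlb)).symm : "synonym" = r)
        · by_cases h3 : "fuzzy" ∈ b :: rest
          · have hfind : (["exact", "scene", "synonym", "fuzzy", "partial"] : List String).find?
                (fun p => (b :: rest).contains p) = some "fuzzy" := by
                  have c0 : ((b :: rest).contains "exact") = false := by simpa using h0
                  have c1 : ((b :: rest).contains "scene") = false := by simpa using h1
                  have c2 : ((b :: rest).contains "synonym") = false := by simpa using h2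
                  have cp : ((b :: rest).contains "fuzzy") = true := by simpa using h3
                  simp only [List.find?_cons, c0, c1, c2, cp]
            rw [hfind]
            have hub : pvKey r ≤ 3 := by simpa using hmin _ h3
            have hlb : 3 ≤ pvKey r := by
              rcases lt_or_ge (pvKey r) 3 with hl | hg
              · rcases lt_or_ge (pvKey r) 1 with hl' | hg'
                · exact absurd (pvKey_val0 r (le_antisymm (by omega) (pvKey_nonneg r)) ▸ hmem) h0
                · rcases lt_or_ge (pvKey r) 2 with hl'' | hg''
                  · exact absurd (pvKey_val1 r (by omega) ▸ hmem) h1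
                  · exact absurd (pvKey_val2 r (by omega) ▸ hmem) h2
              · exact hg
            exact ((pvKey_val3 r (le_antisymm hub hlb)).symm : "fuzzy" = r)
          · by_cases h4 : "partial" ∈ b :: rest
            · have hfind : (["exact", "scene", "synonym", "fuzzy", "partial"] : List String).find?
                  (fun p => (b :: rest).contains p) = some "partial" := by
                    have c0 : ((b :: rest).contains "exact") = false := by simpa using h0
                    have c1 : ((b :: rest).contains "scene") = false := by simpa using h1
                    have c2 : ((b :: rest).contains "synonym") = false := by simpa using h2
                    have c3 : ((b :: rest).contains "fuzzy") = false := by simpa using h3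
                    have cp : ((b :: rest).contains "partial") = true := by simpa using h4
                    simp only [List.find?_cons, c0, c1, c2, c3, cp]
              rw [hfind]
              have hub : pvKey r ≤ 4 := by simpa using hmin _ h4
              have hlb : 4 ≤ pvKey r := by
                rcases lt_or_ge (pvKey r) 4 with hl | hg
                · rcases lt_or_ge (pvKey r) 1 with hl' | hg'
                  · exact absurd (pvKey_val0 r (le_antisymm (by omega) (pvKey_nonneg r)) ▸ hmem) h0
                  · rcases lt_or_ge (pvKey r) 2 with hl'' | hg''
                    · exact absurd (pvKey_val1 r (by omega) ▸ hmem) h1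
                    · rcases lt_or_ge (pvKey r) 3 with hl3 | hg3
                      · exact absurd (pvKey_val2 r (by omega) ▸ hmem) h2
                      · exact absurd (pvKey_val3 r (by omega) ▸ hmem) h3
                · exact hg
              exact ((pvKey_val4 r (le_antisymm hub hlb)).symm : "partial" = r)
            · have hfind : (["exact", "scene", "synonym", "fuzzy", "partial"] : List String).find?
                  (fun p => (b :: rest).contains p) = none := by
                    have c0 : ((b :: rest).contains "exact") = false := by simpa using h0
                    have c1 : ((b :: rest).contains "scene") = false := by simpa using h1
                    have c2 : ((b :: rest).contains "synonym") = false := by simpa using h2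
                    have c3 : ((b :: rest).contains "fuzzy") = false := by simpa using h3
                    have c4 : ((b :: rest).contains "partial") = false := by simpa using h4
                    simp only [List.find?_cons, List.find?_nil, c0, c1, c2, c3, c4]
              rw [hfind]
              have hb5 : pvKey b = 5 :=
                pvKey_five b (fun e => h0 (e ▸ List.mem_cons_self))
                  (fun e => h1 (e ▸ List.mem_cons_self)) (fun e => h2 (e ▸ List.mem_cons_self))
                  (fun e => h3 (e ▸ List.mem_cons_self)) (fun e => h4 (e ▸ List.mem_cons_self))
              have hrb : r = b := by
                rw [hr]
                apply foldl_keep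
                intro t ht
                have ht5 : pvKey t = 5 :=
                  pvKey_five t (fun e => h0 (e ▸ List.mem_cons_of_mem _ ht))
                    (fun e => h1 (e ▸ List.mem_cons_of_mem _ ht))
                    (fun e => h2 (e ▸ List.mem_cons_of_mem _ ht))
                    (fun e => h3 (e ▸ List.mem_cons_of_mem _ ht))
                    (fun e => h4 (e ▸ List.mem_cons_of_mem _ ht))
                rw [ht5, hb5]
                omega
              rw [hrb]
              simp [PySem.List.pyGet?, PySem.List.pyIdx?]
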